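-- pv_equiv track=rewrite | github.com/kuroiSora51/SMCCD-Tranfer-Guide | scrape_webschedule_alt_db.py | section_slice
-- ===== SOURCE A (Python) =====
-- SECTION_HEADINGS = [
--     'Course Information',
--     'Course Details',
--     'Meeting Information',
--     'Critical Dates',
--     'Section Fees',
-- ]
--
-- def section_slice(lines, start_heading):
--     try:
--         start = lines.index(start_heading) + 1
--     except ValueError:
--         return []
--     end = len(lines)
--     for heading in SECTION_HEADINGS:
--         if heading == start_heading:
--             continue
--         try:
--             idx = lines.index(heading, start)
--             end = min(end, idx)
--         except ValueError:
--             pass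
--     return lines[start:end]
-- ===== SOURCE B (Python) =====
-- SECTION_HEADINGS = [
--     'Course Information',
--     'Course Details',
--     'Meeting Information',
--     'Critical Dates',
--     'Section Fees',
-- ]
--
-- def section_slice(lines, start_heading):
--     try:
--         start = lines.index(start_heading) + 1
--     except ValueError:
--         return []
--     others = set(SECTION_HEADINGS) - {start_heading}
--     for i in range(start, len(lines)):
--         if lines[i] in others:
--             return lines[start:i]
--     return lines[start:]
-- ===== Notes on version B (the rewrite author's own statement) =====
-- stated objective: alternative
-- what changed: Instead of one full lines.index scan per heading (up to five passes plus a min), B builds the set of other headings once and makes a single early-terminating pass from start, stopping at the first line that is any other heading.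
import Mathlib
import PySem

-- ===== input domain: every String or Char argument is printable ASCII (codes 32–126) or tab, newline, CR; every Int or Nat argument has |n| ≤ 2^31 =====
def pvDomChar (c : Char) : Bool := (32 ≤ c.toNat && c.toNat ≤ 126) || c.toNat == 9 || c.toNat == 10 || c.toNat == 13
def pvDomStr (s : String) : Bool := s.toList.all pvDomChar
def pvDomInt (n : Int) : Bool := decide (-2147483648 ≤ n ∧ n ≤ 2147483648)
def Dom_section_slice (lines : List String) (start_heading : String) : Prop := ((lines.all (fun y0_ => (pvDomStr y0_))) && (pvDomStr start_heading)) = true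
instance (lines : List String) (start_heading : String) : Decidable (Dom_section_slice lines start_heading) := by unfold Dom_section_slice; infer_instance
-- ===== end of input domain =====

-- B replaces A's per-heading index scans (plus min) by one early-terminating pass over the
-- lines from start, stopping at the first line that is any other heading (objective: alternative single-pass algorithm).


-- ===== PORT A =====
def SECTION_HEADINGS : List String :=
  ["Course Information", "Course Details", "Meeting Information", "Critical Dates", "Section Fees"]

-- lines.index(heading, start): exact for 0 ≤ start (which holds here, start = idx + 1):
-- Python searches from position start, so the found index is start + position in lines.drop start.
def pyIndexFrom (lines : List String) (v : String) (start : Nat) : Option Nat :=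
  (PySem.List.index? (lines.drop start) v).map (· + start)

def section_slice (lines : List String) (start_heading : String) : List String :=
  match PySem.List.index? lines start_heading with
  | none => []          -- except ValueError: return []
  | some i =>
    let start := i + 1
    let e := SECTION_HEADINGS.foldl (fun e heading =>
      if heading == start_heading then e
      else match pyIndexFrom lines heading start with
           | some idx => min e idx
           | none => e) lines.length
    PySem.List.slice lines (some (start : Int)) (some (e : Int))

-- ===== PORT B =====
def section_slice_alt (lines : List String) (start_heading : String) : List String :=
  match PySem.List.index? lines start_heading with
  | none => []
  | some i =>
    let start := i + 1
    let others := SECTION_HEADINGS.filter (fun h => !(h == start_heading))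
    let tail := lines.drop start
    match tail.findIdx? (fun line => others.contains line) with
    | some j => tail.take j          -- return lines[start:i]
    | none => tail                   -- return lines[start:]

-- ===== PRECONDITION & SPEC =====
def Spec_section_slice (lines : List String) (start_heading : String) (out : List String) : Prop := out = section_slice_alt lines start_heading
instance (lines : List String) (start_heading : String) (out : List String) : Decidable (Spec_section_slice lines start_heading out) := by unfold Spec_section_slice; infer_instance

-- ===== CLAIM (what is proved, stated in full; the proofs are below) =====
def Claim_equal_section_slice : Prop := ∀ (lines : List String) (start_heading : String), Dom_section_slice lines start_heading → Spec_section_slice lines start_heading (section_slice lines start_heading)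

-- ===== LEMMAS AND PROOFS =====

-- the min-fold over a heading list hs with first-index lookups in l, started at e
def minFold (hs : List String) (l : List String) (e : Nat) : Nat :=
  hs.foldl (fun e h =>
    match PySem.List.index? l h with
    | some j => min e j
    | none => e) e

theorem minFold_le (hs l : List String) (e : Nat) : minFold hs l e ≤ e := by
  induction hs generalizing e with
  | nil => simp [minFold]
  | cons h t ih =>
    simp only [minFold, List.foldl_cons]
    cases hx : PySem.List.index? l h with
    | none => exact ih e
    | some j => exact le_trans (ih (min e j)) (Nat.min_le_left _ _)

theorem minFold_le_mem (hs l : List String) (e : Nat) (h : String) (j : Nat) :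
    h ∈ hs → PySem.List.index? l h = some j → minFold hs l e ≤ j := by
  induction hs generalizing e with
  | nil => intro hmem; cases hmem
  | cons h' t ih =>
    intro hmem hidx
    simp only [minFold, List.foldl_cons]
    rcases List.mem_cons.mp hmem with rfl | hmem'
    · rw [hidx]
      exact le_trans (minFold_le t l (min e j)) (Nat.min_le_right _ _)
    · cases hx : PySem.List.index? l h' with
      | none => exact ih e hmem' hidx
      | some k => exact ih (min e k) hmem' hidx

theorem minFold_succ (hs l : List String) (x : String) (hne : ∀ h ∈ hs, h ≠ x) (e : Nat) :
    minFold hs (x :: l) (e + 1) = minFold hs l e + 1 := by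
  induction hs generalizing e with
  | nil => simp [minFold]
  | cons h t ih =>
    have hhx : x ≠ h := Ne.symm (hne h (List.mem_cons_self))
    have hne' : ∀ h' ∈ t, h' ≠ x := fun h' hm => hne h' (List.mem_cons_of_mem _ hm)
    have ih' := ih hne'
    simp only [minFold, List.foldl_cons] at ih' ⊢
    rw [PySem.List.index?_cons_of_ne l hhx]
    cases hx : PySem.List.index? l h with
    | none => simpa using ih' e
    | some j =>
      simp only [Option.map_some]
      have hmin : min (e + 1) (j + 1) = min e j + 1 := by omega
      rw [hmin]
      exact ih' (min e j)

-- the min over first indices of the headings equals the first index of any heading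
theorem minFold_eq_findIdx (hs l : List String) :
    minFold hs l l.length =
      (match l.findIdx? (fun line => hs.contains line) with
       | some j => j
       | none => l.length) := by
  induction l with
  | nil => simpa using Nat.le_zero.mp (minFold_le hs [] 0)
  | cons x xs ih =>
    by_cases hx : x ∈ hs
    · have h0 : PySem.List.index? (x :: xs) x = some 0 := PySem.List.index?_cons_self ..
      have hz : minFold hs (x :: xs) (x :: xs).length = 0 :=
        Nat.le_zero.mp (minFold_le_mem _ _ _ x 0 hx h0)
      have hc : hs.contains x = true := by simpa using hx
      rw [hz, List.findIdx?_cons, hc]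
      rfl
    · have hne : ∀ h ∈ hs, h ≠ x := fun h hm hcontra => hx (hcontra ▸ hm)
      have hc : hs.contains x = false := by simpa using hx
      have hlen : (x :: xs).length = xs.length + 1 := rfl
      rw [hlen, minFold_succ hs xs x hne, ih, List.findIdx?_cons, hc]
      simp only [Bool.false_eq_true, if_false]
      cases hfi : xs.findIdx? (fun line => hs.contains line) with
      | none => rfl
      | some j => rfl

-- an if-skip fold is the plain fold over the complement filter
theorem foldl_skip_filter {α β : Type} (f : β → α → β) (p : α → Bool) (l : List α) (b : β) :
    l.foldl (fun acc x => if p x then acc else f acc x) b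
      = (l.filter (fun x => !(p x))).foldl f b := by
  induction l generalizing b with
  | nil => rfl
  | cons x t ih => by_cases hx : p x <;> simp [hx, ih]

theorem section_slice_eq (lines : List String) (start_heading : String) :
    section_slice lines start_heading = section_slice_alt lines start_heading := by
  unfold section_slice section_slice_alt
  cases hidx : PySem.List.index? lines start_heading with
  | none => rfl
  | some i =>
    simp only []
    set start := i + 1 with hstart
    set tail := lines.drop start with htail
    set others := SECTION_HEADINGS.filter (fun h => !(h == start_heading)) with hoth
    have hi : i < lines.length := by
      rcases PySem.List.getElem_of_index?_eq_some hidx with ⟨hk, _, _⟩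
      exact hk
    have hlen : lines.length = start + tail.length := by
      simp [htail, hstart]; omega
    have hfilter :
        SECTION_HEADINGS.foldl (fun e heading =>
          if heading == start_heading then e
          else match pyIndexFrom lines heading start with
               | some idx => min e idx
               | none => e) lines.length
        = others.foldl (fun e heading =>
            match pyIndexFrom lines heading start with
            | some idx => min e idx
            | none => e) lines.length := by
      rw [hoth]
      exact foldl_skip_filter _ (fun h => h == start_heading) _ _
    have hshift : ∀ (hs : List String) (e : Nat),
        hs.foldl (fun e heading =>
          match pyIndexFrom lines heading start with
          | some idx => min e idx
          | none => e) (start + e)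
        = start + minFold hs tail e := by
      intro hs
      induction hs with
      | nil => intro e; simp [minFold]
      | cons h t ih =>
        intro e
        simp only [List.foldl_cons, minFold, pyIndexFrom, ← htail]
        cases hx : PySem.List.index? tail h with
        | none => simpa [minFold] using ih e
        | some j =>
          simp only [Option.map_some]
          have : min (start + e) (j + start) = start + min e j := by omega
          rw [this]
          simpa [minFold] using ih (min e j)
    rw [hfilter, hlen, hshift others tail.length, minFold_eq_findIdx]
    cases hfi : tail.findIdx? (fun line => others.contains line) with
    | some j =>
      show PySem.List.slice lines (some (start : Int)) (some ((start + j : Nat) : Int))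
        = tail.take j
      have hcast : ((start + j : Nat) : Int) = (start : Int) + (j : Int) := by push_cast; ring
      rw [hcast, PySem.List.slice_natCast_add, ← htail]
    | none =>
      show PySem.List.slice lines (some (start : Int)) (some ((start + tail.length : Nat) : Int))
        = tail
      have hcast : ((start + tail.length : Nat) : Int) = (start : Int) + (tail.length : Int) := by
        push_cast; ring
      rw [hcast, PySem.List.slice_natCast_add, ← htail, List.take_length]

-- ===== VERDICT (by name: the statement is the Claim_ definition above) =====
theorem section_slice_spec : Claim_equal_section_slice := by
  intro lines start_heading _
  exact section_slice_eq lines start_heading
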